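-- pv_equiv track=rewrite | github.com/LokoKanishka/Golem | scripts/golem_host_describe_analyze.py | consistency_claim
-- ===== SOURCE A (Python) =====
-- def consistency_claim(category: str, app: str, useful_lines: list[dict[str, object]]) -> str:
--     joined = " ".join(item["text"] for item in useful_lines).lower()
--     if category == "chat":
--         if any(marker in joined for marker in ["nuevo chat", "biblioteca", "chatgpt", "compartir"]):
--             return "Window metadata and prioritized visible text both support a chat-style reading rather than a generic browser page."
--         return "Metadata strongly suggests a chat workspace; the visible text is directionally consistent but still partial."
--     if category == "editor":
--         if any(marker in joined for marker in ["explorer", "workspace", "repository", ".py", "open file"]):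
--             return "Window metadata and prioritized visible text both support an editor / IDE reading instead of a generic document view."
--         return "Metadata strongly suggests an editor / IDE; the visible text only partially confirms that reading."
--     if category == "terminal":
--         if any(marker in joined for marker in ["traceback", "failed", "$", "git", "python"]):
--             return "Window metadata and prioritized visible text both support a terminal / console reading."
--         return "Metadata strongly suggests a terminal; the visible text only partially confirms that reading."
--     if category == "browser-web-app":
--         return "Window metadata identifies a browser-class surface; prioritized visible text supports a web app reading without proving hidden tabs or off-screen state."
--     return f'Window metadata identifies the surface as {app}; prioritized visible text is useful but still not enough to classify it strongly.'
-- ===== SOURCE B (Python) =====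
-- _MARKER_PAIRS = [
--     ("nuevo chat", "chat"), ("biblioteca", "chat"), ("chatgpt", "chat"), ("compartir", "chat"),
--     ("explorer", "editor"), ("workspace", "editor"), ("repository", "editor"), (".py", "editor"), ("open file", "editor"),
--     ("traceback", "terminal"), ("failed", "terminal"), ("$", "terminal"), ("git", "terminal"), ("python", "terminal"),
-- ]
--
-- _MESSAGES = {
--     ("chat", True): "Window metadata and prioritized visible text both support a chat-style reading rather than a generic browser page.",
--     ("chat", False): "Metadata strongly suggests a chat workspace; the visible text is directionally consistent but still partial.",
--     ("editor", True): "Window metadata and prioritized visible text both support an editor / IDE reading instead of a generic document view.",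
--     ("editor", False): "Metadata strongly suggests an editor / IDE; the visible text only partially confirms that reading.",
--     ("terminal", True): "Window metadata and prioritized visible text both support a terminal / console reading.",
--     ("terminal", False): "Metadata strongly suggests a terminal; the visible text only partially confirms that reading.",
-- }
--
--
-- def consistency_claim(category: str, app: str, useful_lines: list[dict[str, object]]) -> str:
--     joined = " ".join(item["text"] for item in useful_lines).lower()
--     confirmed = {cat for marker, cat in _MARKER_PAIRS if marker in joined}
--     msg = _MESSAGES.get((category, category in confirmed))
--     if msg is not None:
--         return msg
--     if category == "browser-web-app":
--         return "Window metadata identifies a browser-class surface; prioritized visible text supports a web app reading without proving hidden tabs or off-screen state."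
--     return f'Window metadata identifies the surface as {app}; prioritized visible text is useful but still not enough to classify it strongly.'
-- ===== Notes on version B (the rewrite author's own statement) =====
-- stated objective: alternative
-- what changed: Instead of an if/elif chain that scans each category's own marker list, B does one flat pass over all (marker, category) pairs building the set of text-confirmed categories, then selects the message via a dict keyed by (category, category in confirmed); browser-web-app and the f-string fallback stay explicit.
import Mathlib
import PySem

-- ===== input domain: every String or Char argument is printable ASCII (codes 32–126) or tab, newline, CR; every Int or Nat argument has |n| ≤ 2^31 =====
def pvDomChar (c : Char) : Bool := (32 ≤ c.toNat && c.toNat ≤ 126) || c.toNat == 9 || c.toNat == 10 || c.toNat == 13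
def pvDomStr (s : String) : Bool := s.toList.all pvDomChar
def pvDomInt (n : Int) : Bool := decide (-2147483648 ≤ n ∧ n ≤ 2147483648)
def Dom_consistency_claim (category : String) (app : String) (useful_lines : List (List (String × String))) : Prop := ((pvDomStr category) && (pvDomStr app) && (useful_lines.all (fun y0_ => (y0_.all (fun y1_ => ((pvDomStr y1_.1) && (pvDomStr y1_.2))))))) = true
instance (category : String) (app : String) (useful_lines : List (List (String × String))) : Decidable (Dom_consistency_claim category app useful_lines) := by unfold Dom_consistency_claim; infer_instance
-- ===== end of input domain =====

-- B replaces A's per-category if/elif marker scans by one flat pass over all (marker, category)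
-- pairs building the set of confirmed categories, then a message lookup keyed by
-- (category, category in confirmed); same cost, different structure.
-- Pre_ excludes inputs where some line dict lacks the key "text" (A raises KeyError there; so does B).

-- shared by both ports: both Pythons compute 'joined' with the identical expression
-- " ".join(item["text"] for item in useful_lines).lower(); item["text"] is total here
-- via getD "" (Pre_ guarantees the key is present).
def pvJoined (useful_lines : List (List (String × String))) : String :=
  PySem.Str.lower (PySem.Str.join " "
    (useful_lines.map (fun item => ((PySem.Dict.mk item).get? "text").getD "")))

-- ===== PORT A =====
def consistency_claim (category : String) (app : String) (useful_lines : List (List (String × String))) : String :=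
  if category == "chat" then
    if ["nuevo chat", "biblioteca", "chatgpt", "compartir"].any (fun m => PySem.Str.isIn m (pvJoined useful_lines)) then
      "Window metadata and prioritized visible text both support a chat-style reading rather than a generic browser page."
    else
      "Metadata strongly suggests a chat workspace; the visible text is directionally consistent but still partial."
  else if category == "editor" then
    if ["explorer", "workspace", "repository", ".py", "open file"].any (fun m => PySem.Str.isIn m (pvJoined useful_lines)) then
      "Window metadata and prioritized visible text both support an editor / IDE reading instead of a generic document view."
    else
      "Metadata strongly suggests an editor / IDE; the visible text only partially confirms that reading."
  else if category == "terminal" then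
    if ["traceback", "failed", "$", "git", "python"].any (fun m => PySem.Str.isIn m (pvJoined useful_lines)) then
      "Window metadata and prioritized visible text both support a terminal / console reading."
    else
      "Metadata strongly suggests a terminal; the visible text only partially confirms that reading."
  else if category == "browser-web-app" then
    "Window metadata identifies a browser-class surface; prioritized visible text supports a web app reading without proving hidden tabs or off-screen state."
  else
    PySem.Str.join "" ["Window metadata identifies the surface as ", app, "; prioritized visible text is useful but still not enough to classify it strongly."]

-- ===== PORT B =====
def pvMarkerPairs : List (String × String) :=
  [ ("nuevo chat", "chat"), ("biblioteca", "chat"), ("chatgpt", "chat"), ("compartir", "chat"),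
    ("explorer", "editor"), ("workspace", "editor"), ("repository", "editor"), (".py", "editor"), ("open file", "editor"),
    ("traceback", "terminal"), ("failed", "terminal"), ("$", "terminal"), ("git", "terminal"), ("python", "terminal") ]

def pvMessages : PySem.Dict (String × Bool) String :=
  PySem.Dict.mk
    [ (("chat", true), "Window metadata and prioritized visible text both support a chat-style reading rather than a generic browser page."),
      (("chat", false), "Metadata strongly suggests a chat workspace; the visible text is directionally consistent but still partial."),
      (("editor", true), "Window metadata and prioritized visible text both support an editor / IDE reading instead of a generic document view."),
      (("editor", false), "Metadata strongly suggests an editor / IDE; the visible text only partially confirms that reading."),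
      (("terminal", true), "Window metadata and prioritized visible text both support a terminal / console reading."),
      (("terminal", false), "Metadata strongly suggests a terminal; the visible text only partially confirms that reading.") ]

def consistency_claim_alt (category : String) (app : String) (useful_lines : List (List (String × String))) : String :=
  -- confirmed = set comprehension {cat for marker, cat in _MARKER_PAIRS if marker in joined}
  match pvMessages.get? (category,
      PySem.Set.contains
        (PySem.Set.ofList ((pvMarkerPairs.filter
          (fun p => PySem.Str.isIn p.1 (pvJoined useful_lines))).map (·.2))) category) with
  | some msg => msg
  | none =>
      if category == "browser-web-app" then
        "Window metadata identifies a browser-class surface; prioritized visible text supports a web app reading without proving hidden tabs or off-screen state."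
      else
        PySem.Str.join "" ["Window metadata identifies the surface as ", app, "; prioritized visible text is useful but still not enough to classify it strongly."]

-- ===== PRECONDITION & SPEC =====
-- Pre_ excludes exactly the inputs where some line dict has no "text" key: A raises KeyError there.
def Pre_consistency_claim (category : String) (app : String) (useful_lines : List (List (String × String))) : Prop :=
  (useful_lines.all (fun item => item.any (fun p => p.1 == "text"))) = true
instance (category : String) (app : String) (useful_lines : List (List (String × String))) : Decidable (Pre_consistency_claim category app useful_lines) := by unfold Pre_consistency_claim; infer_instance

def pvWitness_consistency_claim : String × String × (List (List (String × String))) :=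
  ("chat", "app", [[("text", "hello chatgpt")]])

def Spec_consistency_claim (category : String) (app : String) (useful_lines : List (List (String × String))) (out : String) : Prop := out = consistency_claim_alt category app useful_lines
instance (category : String) (app : String) (useful_lines : List (List (String × String))) (out : String) : Decidable (Spec_consistency_claim category app useful_lines out) := by unfold Spec_consistency_claim; infer_instance

-- ===== CLAIM (what is proved, stated in full; the proofs are below) =====
def Claim_equal_consistency_claim : Prop := ∀ (category : String) (app : String) (useful_lines : List (List (String × String))), Dom_consistency_claim category app useful_lines → Pre_consistency_claim category app useful_lines → Spec_consistency_claim category app useful_lines (consistency_claim category app useful_lines)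

-- ===== LEMMAS AND PROOFS =====

theorem pv_mem_confirmed (x : String) (j : String) :
    x ∈ PySem.Set.ofList ((pvMarkerPairs.filter (fun p => PySem.Str.isIn p.1 j)).map (·.2)) ↔
      ∃ p ∈ pvMarkerPairs, PySem.Str.isIn p.1 j = true ∧ p.2 = x := by
  simp [PySem.Set.mem_ofList, List.mem_filter, List.mem_map]

theorem pv_contains_cat (j : String) (cat : String) (ms : List String)
    (hfwd : ∀ p ∈ pvMarkerPairs, p.2 = cat → p.1 ∈ ms)
    (hbwd : ∀ m ∈ ms, (m, cat) ∈ pvMarkerPairs) :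
    PySem.Set.contains
      (PySem.Set.ofList ((pvMarkerPairs.filter (fun p => PySem.Str.isIn p.1 j)).map (·.2))) cat
    = ms.any (fun m => PySem.Str.isIn m j) := by
  have hc : PySem.Set.contains
      (PySem.Set.ofList ((pvMarkerPairs.filter (fun p => PySem.Str.isIn p.1 j)).map (·.2))) cat
      = decide (cat ∈ PySem.Set.ofList ((pvMarkerPairs.filter (fun p => PySem.Str.isIn p.1 j)).map (·.2))) := by
    simp [PySem.Set.contains]
  rw [hc, Bool.eq_iff_iff]
  simp only [decide_eq_true_eq, pv_mem_confirmed, List.any_eq_true]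
  constructor
  · rintro ⟨p, hp, hin, hcat⟩
    exact ⟨p.1, hfwd p hp hcat, hin⟩
  · rintro ⟨m, hm, hin⟩
    exact ⟨(m, cat), hbwd m hm, hin, rfl⟩

-- ===== VERDICT (by name: the statement is the Claim_ definition above) =====
theorem consistency_claim_spec : Claim_equal_consistency_claim := by
  intro category app useful_lines _ _
  unfold Spec_consistency_claim consistency_claim consistency_claim_alt
  by_cases h1 : category = "chat"
  · subst h1
    rw [pv_contains_cat _ _ ["nuevo chat", "biblioteca", "chatgpt", "compartir"] (by decide) (by decide)]
    generalize (["nuevo chat", "biblioteca", "chatgpt", "compartir"].any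
        (fun m => PySem.Str.isIn m (pvJoined useful_lines))) = b
    cases b <;> rfl
  · by_cases h2 : category = "editor"
    · subst h2
      rw [pv_contains_cat _ _ ["explorer", "workspace", "repository", ".py", "open file"] (by decide) (by decide)]
      generalize (["explorer", "workspace", "repository", ".py", "open file"].any
          (fun m => PySem.Str.isIn m (pvJoined useful_lines))) = b
      cases b <;> rfl
    · by_cases h3 : category = "terminal"
      · subst h3
        rw [pv_contains_cat _ _ ["traceback", "failed", "$", "git", "python"] (by decide) (by decide)]
        generalize (["traceback", "failed", "$", "git", "python"].any
            (fun m => PySem.Str.isIn m (pvJoined useful_lines))) = b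
        cases b <;> rfl
      · simp [pvMessages, PySem.Dict.get?, Prod.ext_iff, h1, h2, h3,
              Ne.symm h1, Ne.symm h2, Ne.symm h3]
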